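-- pv_equiv track=rewrite | github.com/elthorne/katas | katas/digit_x_digit.py | square_digits_verbose_original
-- ===== SOURCE A (Python) =====
-- def square_digits_verbose_original(input_number: int):
--     # int
--     if type(input_number) != int:
--         raise TypeError("Input number must be an int")
--
--     list_of_squared_intergers = []
--
--     # string
--     string_number = str(input_number)
--
--     for digit in string_number:
--         # int
--         integer_digit = int(digit)
--         list_of_squared_intergers.append(integer_digit**2)
--
--     # string
--     concatenated_string_result = "".join(map(str, list_of_squared_intergers))
--
--     # integer
--     integer_result = int(concatenated_string_result)
--     return integer_result
-- ===== SOURCE B (Python) =====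
-- def square_digits_verbose_original(input_number):
--     if type(input_number) != int:
--         raise TypeError("Input number must be an int")
--
--     # collect the decimal digits of the number arithmetically (least significant first)
--     n = input_number
--     digits = []
--     while n > 0:
--         digits.append(n % 10)
--         n //= 10
--
--     # fold the squares into a single integer, shifting by one or two decimal places
--     result = 0
--     for d in reversed(digits):
--         sq = d * d
--         result = result * (100 if sq >= 10 else 10) + sq
--     return result
-- ===== Notes on version B (the rewrite author's own statement) =====
-- stated objective: faster
-- what changed: B replaces A's string pipeline (build a list of squares, str() each, join, final int() parse) by pure integer arithmetic: it extracts the digits with % and // and folds the squares into one accumulator, shifting by one or two decimal places depending on the square's magnitude.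
import Mathlib
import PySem

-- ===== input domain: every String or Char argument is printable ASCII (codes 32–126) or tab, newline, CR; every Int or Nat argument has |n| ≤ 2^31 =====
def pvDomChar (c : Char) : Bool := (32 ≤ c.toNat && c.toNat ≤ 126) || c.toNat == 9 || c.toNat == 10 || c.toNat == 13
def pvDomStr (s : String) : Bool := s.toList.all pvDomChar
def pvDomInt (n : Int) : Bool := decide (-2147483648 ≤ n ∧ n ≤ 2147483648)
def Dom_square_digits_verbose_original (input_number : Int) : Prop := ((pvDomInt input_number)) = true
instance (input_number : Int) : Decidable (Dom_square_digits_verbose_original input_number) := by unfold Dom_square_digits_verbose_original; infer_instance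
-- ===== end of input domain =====

-- B concatenates the squares of the decimal digits with integer arithmetic (% and // digit
-- extraction, accumulator shifted by one or two decimal places) instead of A's
-- list-of-squares → str → join → int string pipeline; measurably faster by a constant factor.

-- ===== PORT A =====
-- hand-ported int(): this program only ever passes int() a single character of str(input_number)
-- or a concatenation of decimal digit characters; on a string of ASCII digits int() returns its
-- value, on any other such single character ('-') it raises ValueError (= none) — exact here.
def pvIntOfDigits? (cs : List Char) : Option Int :=
  if cs ≠ [] ∧ cs.all Char.isDigit then
    some (cs.foldl (fun a c => 10 * a + ((c.toNat : Int) - 48)) 0)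
  else none

def square_digits_verbose_original (input_number : Int) : Int :=
  -- string_number = str(input_number)
  let string_number := PySem.Int.toChars input_number
  -- for digit in string_number: list.append(int(digit) ** 2)
  let list_of_squared_intergers : List Int :=
    string_number.foldl (fun acc c => acc ++ [((pvIntOfDigits? [c]).getD 0) ^ 2]) []
  -- "".join(map(str, list_of_squared_intergers))
  let concatenated_string_result :=
    PySem.Chars.join [] (list_of_squared_intergers.map PySem.Int.toChars)
  -- int(concatenated_string_result)
  (pvIntOfDigits? concatenated_string_result).getD 0

-- ===== PORT B =====
-- while n > 0: digits.append(n % 10); n //= 10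
def pvDigitsB (n : Int) : List Int :=
  if h : 0 < n then
    PySem.Int.mod n 10 :: pvDigitsB (PySem.Int.floordiv n 10)
  else []
termination_by n.toNat
decreasing_by
  have h2 : PySem.Int.floordiv n 10 = n / 10 := PySem.Int.floordiv_eq_ediv_of_pos (by omega)
  rw [h2]
  omega

def square_digits_verbose_original_alt (input_number : Int) : Int :=
  (pvDigitsB input_number).reverse.foldl
    (fun result d =>
      let sq := d * d
      result * (if sq ≥ 10 then 100 else 10) + sq) 0

-- ===== PRECONDITION & SPEC =====
-- Pre_ excludes exactly the negative inputs: there A raises ValueError at int('-').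
def Pre_square_digits_verbose_original (input_number : Int) : Prop := 0 ≤ input_number
instance (input_number : Int) : Decidable (Pre_square_digits_verbose_original input_number) := by unfold Pre_square_digits_verbose_original; infer_instance
def pvWitness_square_digits_verbose_original : Int := 9119

def Spec_square_digits_verbose_original (input_number : Int) (out : Int) : Prop := out = square_digits_verbose_original_alt input_number
instance (input_number : Int) (out : Int) : Decidable (Spec_square_digits_verbose_original input_number out) := by unfold Spec_square_digits_verbose_original; infer_instance

-- ===== CLAIM (what is proved, stated in full; the proofs are below) =====
def Claim_equal_square_digits_verbose_original : Prop := ∀ (input_number : Int), Dom_square_digits_verbose_original input_number → Pre_square_digits_verbose_original input_number → Spec_square_digits_verbose_original input_number (square_digits_verbose_original input_number)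

-- ===== LEMMAS AND PROOFS =====

-- big-endian decimal digits of a natural number (reference used only by the proofs)
def pvBigD (m : Nat) : List Nat :=
  if h : m < 10 then [m] else pvBigD (m / 10) ++ [m % 10]
decreasing_by omega

lemma pvBigD_small {m : Nat} (h : m < 10) : pvBigD m = [m] := by
  rw [pvBigD, dif_pos h]

lemma pvBigD_lt : ∀ m : Nat, ∀ d ∈ pvBigD m, d < 10 := by
  intro m
  induction m using Nat.strong_induction_on with
  | _ m ih =>
    intro d hd
    rw [pvBigD] at hd
    split at hd
    · next h => simp at hd; omega
    · next h =>
      rw [List.mem_append] at hd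
      rcases hd with hd | hd
      · exact ih (m / 10) (by omega) d hd
      · simp at hd; omega

lemma pvBigD_ne_nil (m : Nat) : pvBigD m ≠ [] := by
  rw [pvBigD]
  split <;> simp

lemma toDigits_eq_pvBigD : ∀ m : Nat, Nat.toDigits 10 m = (pvBigD m).map Nat.digitChar := by
  intro m
  induction m using Nat.strong_induction_on with
  | _ m ih =>
    rw [pvBigD]
    split
    · next h => rw [Nat.toDigits_of_lt_base h]; simp
    · next h =>
      rw [Nat.toDigits_of_base_le (by norm_num) (by omega), List.map_append,
        ← ih (m / 10) (by omega)]
      simp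

lemma pvToChars_natCast (m : Nat) : PySem.Int.toChars (m : Int) = Nat.toDigits 10 m := by
  simp [PySem.Int.toChars]

lemma pvDigitsB_zero : pvDigitsB 0 = [] := by
  rw [pvDigitsB]; simp

lemma pvDigitsB_reverse : ∀ m : Nat, 0 < m →
    (pvDigitsB (m : Int)).reverse = (pvBigD m).map (Nat.cast) := by
  intro m
  induction m using Nat.strong_induction_on with
  | _ m ih =>
    intro hm
    have hmod : PySem.Int.mod (m : Int) 10 = ((m % 10 : Nat) : Int) := by
      exact_mod_cast PySem.Int.mod_natCast m 10
    have hdiv : PySem.Int.floordiv (m : Int) 10 = ((m / 10 : Nat) : Int) := by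
      exact_mod_cast PySem.Int.floordiv_natCast m 10
    rw [pvDigitsB, dif_pos (by exact_mod_cast hm), hmod, hdiv, pvBigD]
    by_cases h10 : m < 10
    · rw [dif_pos h10]
      have h0 : m / 10 = 0 := by omega
      rw [h0, Nat.cast_zero, pvDigitsB_zero]
      simp [Nat.mod_eq_of_lt h10]
    · rw [dif_neg h10, List.reverse_cons, ih (m / 10) (by omega) (by omega), List.map_append]
      simp

-- value of a run of digits appended to an accumulator
def pvValD (a : Int) (ds : List Nat) : Int :=
  ds.foldl (fun (a : Int) (d : Nat) => 10 * a + (d : Int)) a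

lemma pvValD_append_singleton (a : Int) (xs : List Nat) (r : Nat) :
    pvValD a (xs ++ [r]) = 10 * pvValD a xs + r := by
  simp [pvValD, List.foldl_append]

lemma pvValD_eq (a : Int) (ds : List Nat) :
    List.foldl (fun (a : Int) (d : Nat) => 10 * a + (d : Int)) a ds = pvValD a ds := rfl

lemma pvValD_pvBigD : ∀ (k : Nat) (a : Int),
    pvValD a (pvBigD k) = a * 10 ^ (pvBigD k).length + k := by
  intro k
  induction k using Nat.strong_induction_on with
  | _ k ih =>
    intro a
    rw [pvBigD]
    split
    · next h =>
      simp [pvValD]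
      ring
    · next h =>
      rw [pvValD_append_singleton, ih (k / 10) (by omega) a, List.length_append]
      have hk : (k : Int) = 10 * ((k / 10 : Nat) : Int) + ((k % 10 : Nat) : Int) := by
        push_cast
        omega
      rw [hk]
      simp [pow_succ]
      ring

lemma pvBigD_length_two (k : Nat) (h1 : 10 ≤ k) (h2 : k < 100) :
    (pvBigD k).length = 2 := by
  rw [pvBigD, dif_neg (by omega), pvBigD_small (by omega)]
  simp

lemma pvDigitChar_isDigit {d : Nat} (h : d < 10) : (Nat.digitChar d).isDigit = true := by
  interval_cases d <;> decide

lemma pvParse_digitChar {d : Nat} (h : d < 10) :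
    (pvIntOfDigits? [Nat.digitChar d]).getD 0 = (d : Int) := by
  interval_cases d <;> decide

lemma pvDigitChar_val {d : Nat} (h : d < 10) :
    ((Nat.digitChar d).toNat : Int) - 48 = (d : Int) := by
  interval_cases d <;> decide

lemma pvJoin_nil_flatten : ∀ l : List (List Char), PySem.Chars.join [] l = l.flatten := by
  intro l
  induction l with
  | nil => exact PySem.Chars.join_nil []
  | cons x t ih =>
    cases t with
    | nil => simp [PySem.Chars.join, List.intercalate]
    | cons y s =>
      rw [PySem.Chars.join_cons_cons]
      simp [ih]

-- one-vs-two-digit magnitude of the square of one digit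
lemma pvSeg_val (d : Nat) (hd : d < 10) (a : Int) :
    a * 10 ^ (pvBigD (d ^ 2)).length + ((d ^ 2 : Nat) : Int) =
      a * (if (d : Int) * (d : Int) ≥ 10 then 100 else 10) + (d : Int) * (d : Int) := by
  have hc : ((d ^ 2 : Nat) : Int) = (d : Int) * (d : Int) := by push_cast; ring
  by_cases h : 10 ≤ d ^ 2
  · have h2 : d ^ 2 < 100 := by nlinarith
    rw [pvBigD_length_two _ h h2, hc, if_pos (by rw [← hc]; exact_mod_cast h)]
    norm_num
  · rw [pvBigD_small (by omega), hc, if_neg (by rw [← hc]; exact_mod_cast h)]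
    norm_num

lemma pvA_eval (m : Nat) :
    square_digits_verbose_original (m : Int) =
      (pvBigD m).foldl
        (fun (a : Int) (d : Nat) =>
          a * (if (d : Int) * (d : Int) ≥ 10 then 100 else 10) + (d : Int) * (d : Int))
        0 := by
  simp only [square_digits_verbose_original]
  rw [pvToChars_natCast, toDigits_eq_pvBigD,
    PySem.List.foldl_append_singleton_eq_map, List.nil_append, List.map_map, List.map_map,
    pvJoin_nil_flatten]
  have hSeg : (pvBigD m).map
        ((PySem.Int.toChars ∘ fun c => ((pvIntOfDigits? [c]).getD 0) ^ 2) ∘ Nat.digitChar) =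
      (pvBigD m).map (fun (d : Nat) => (pvBigD (d ^ 2)).map Nat.digitChar) :=
    List.map_congr_left fun d hd => by
      simp only [Function.comp]
      rw [pvParse_digitChar (pvBigD_lt m d hd)]
      have hcast : ((d : Int)) ^ 2 = ((d ^ 2 : Nat) : Int) := by push_cast; ring
      rw [hcast, pvToChars_natCast, toDigits_eq_pvBigD]
  rw [hSeg]
  have hne : ((pvBigD m).map (fun d => (pvBigD (d ^ 2)).map Nat.digitChar)).flatten ≠ [] := by
    obtain ⟨d, t, hdt⟩ : ∃ d t, pvBigD m = d :: t := by
      cases h : pvBigD m with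
      | nil => exact absurd h (pvBigD_ne_nil m)
      | cons a b => exact ⟨a, b, rfl⟩
    rw [hdt]
    simp [pvBigD_ne_nil]
  have hall : (((pvBigD m).map (fun d => (pvBigD (d ^ 2)).map Nat.digitChar)).flatten).all
      Char.isDigit = true := by
    rw [List.all_eq_true]
    intro c hc
    rw [List.mem_flatten] at hc
    obtain ⟨l, hl, hcl⟩ := hc
    rw [List.mem_map] at hl
    obtain ⟨d, hd, rfl⟩ := hl
    rw [List.mem_map] at hcl
    obtain ⟨d', hd', rfl⟩ := hcl
    exact pvDigitChar_isDigit (pvBigD_lt _ d' hd')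
  simp only [pvIntOfDigits?]
  rw [if_pos ⟨hne, hall⟩, Option.getD_some, List.foldl_flatten, List.foldl_map]
  apply PySem.List.foldl_congr_mem
  intro a d hd
  rw [List.foldl_map,
    PySem.List.foldl_congr_mem (pvBigD (d ^ 2)) _ (fun a d' => 10 * a + (d' : Int)) a
      (fun a' d' hd' => by rw [pvDigitChar_val (pvBigD_lt _ d' hd')]),
    pvValD_eq, pvValD_pvBigD]
  exact pvSeg_val d (pvBigD_lt m d hd) a

lemma pvB_eval (m : Nat) (hm : 0 < m) :
    square_digits_verbose_original_alt (m : Int) =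
      (pvBigD m).foldl
        (fun (a : Int) (d : Nat) =>
          a * (if (d : Int) * (d : Int) ≥ 10 then 100 else 10) + (d : Int) * (d : Int))
        0 := by
  simp only [square_digits_verbose_original_alt]
  rw [pvDigitsB_reverse m hm, List.foldl_map]

-- ===== VERDICT (by name: the statement is the Claim_ definition above) =====
theorem square_digits_verbose_original_spec : Claim_equal_square_digits_verbose_original := by
  intro n _ hPre
  unfold Spec_square_digits_verbose_original
  obtain ⟨m, rfl⟩ : ∃ m : Nat, n = (m : Int) := ⟨n.toNat, (Int.toNat_of_nonneg hPre).symm⟩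
  by_cases hm : m = 0
  · subst hm
    have hB : square_digits_verbose_original_alt ((0 : Nat) : Int) = 0 := by
      simp only [square_digits_verbose_original_alt, Nat.cast_zero, pvDigitsB_zero]
      rfl
    rw [hB]
    decide
  · rw [pvA_eval m, pvB_eval m (Nat.pos_of_ne_zero hm)]
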